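-- pv_equiv track=rewrite | github.com/Mlnyuk/ebpf-ml-mao | scripts/step16_generate_report.py | status_label
-- ===== SOURCE A (Python) =====
-- def status_label(statuses: dict[str, str]) -> str:
--     if all(status == "ok" for status in statuses.values()):
--         return "complete"
--     if any(status == "ok" for status in statuses.values()):
--         return "partial"
--     if any(status == "error" for status in statuses.values()):
--         return "error"
--     return "missing"
-- ===== SOURCE B (Python) =====
-- def status_label(statuses: dict[str, str]) -> str:
--     total = ok = err = 0
--     for status in statuses.values():
--         total += 1
--         if status == "ok":
--             ok += 1
--         elif status == "error":
--             err += 1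
--     if ok == total:
--         return "complete"
--     if ok > 0:
--         return "partial"
--     if err > 0:
--         return "error"
--     return "missing"
-- ===== Notes on version B (the rewrite author's own statement) =====
-- stated objective: alternative
-- what changed: Replaces the three short-circuiting all/any scans over the values with one tallying pass (total, ok-count, error-count) and classifies by numeric count comparisons.
import Mathlib
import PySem

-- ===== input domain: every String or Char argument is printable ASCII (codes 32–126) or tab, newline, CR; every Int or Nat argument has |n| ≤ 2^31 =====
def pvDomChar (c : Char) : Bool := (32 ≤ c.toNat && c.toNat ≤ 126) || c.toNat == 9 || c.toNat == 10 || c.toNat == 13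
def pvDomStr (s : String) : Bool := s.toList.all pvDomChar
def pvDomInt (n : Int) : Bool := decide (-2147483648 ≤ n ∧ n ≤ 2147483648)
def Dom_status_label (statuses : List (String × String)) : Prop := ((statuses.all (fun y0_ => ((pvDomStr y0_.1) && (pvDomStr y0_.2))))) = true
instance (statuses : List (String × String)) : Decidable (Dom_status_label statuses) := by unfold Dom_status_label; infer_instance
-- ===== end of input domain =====

-- B replaces A's three short-circuiting all/any scans by one tallying pass plus count comparisons (alternative decomposition, same cost).

-- ===== PORT A =====
def status_label (statuses : List (String × String)) : String :=
  let vs := (PySem.Dict.ofList statuses).values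
  if vs.all (fun status => status == "ok") then "complete"
  else if vs.any (fun status => status == "ok") then "partial"
  else if vs.any (fun status => status == "error") then "error"
  else "missing"

-- ===== PORT B =====
def status_label_alt (statuses : List (String × String)) : String :=
  let t := (PySem.Dict.ofList statuses).values.foldl
    (fun (acc : Int × Int × Int) status =>
      (acc.1 + 1,
       (if status == "ok" then acc.2.1 + 1 else acc.2.1),
       (if status != "ok" && status == "error" then acc.2.2 + 1 else acc.2.2)))
    (0, 0, 0)
  if t.2.1 == t.1 then "complete"
  else if t.2.1 > 0 then "partial"
  else if t.2.2 > 0 then "error"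
  else "missing"

-- ===== PRECONDITION & SPEC =====
def Spec_status_label (statuses : List (String × String)) (out : String) : Prop := out = status_label_alt statuses
instance (statuses : List (String × String)) (out : String) : Decidable (Spec_status_label statuses out) := by unfold Spec_status_label; infer_instance

-- ===== CLAIM (what is proved, stated in full; the proofs are below) =====
def Claim_equal_status_label : Prop := ∀ (statuses : List (String × String)), Dom_status_label statuses → Spec_status_label statuses (status_label statuses)

-- ===== LEMMAS AND PROOFS =====

theorem pv_fold_counts (vs : List String) (t o e : Int) :
    vs.foldl
      (fun (acc : Int × Int × Int) status =>
        (acc.1 + 1,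
         (if status == "ok" then acc.2.1 + 1 else acc.2.1),
         (if status != "ok" && status == "error" then acc.2.2 + 1 else acc.2.2)))
      (t, o, e)
    = (t + vs.length, o + vs.count "ok", e + vs.count "error") := by
  induction vs generalizing t o e with
  | nil => simp
  | cons v vs ih =>
    simp only [List.foldl_cons, ih, List.length_cons, List.count_cons]
    by_cases h : v = "ok"
    · subst h; simp [Prod.ext_iff]; omega
    · by_cases h2 : v = "error"
      · subst h2; simp [Prod.ext_iff]; omega
      · simp [h, h2, bne_iff_ne, Prod.ext_iff]; omega

theorem status_label_agree (vs : List String) :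
    (if vs.all (fun status => status == "ok") then "complete"
     else if vs.any (fun status => status == "ok") then "partial"
     else if vs.any (fun status => status == "error") then "error"
     else "missing")
    = (let t := vs.foldl
        (fun (acc : Int × Int × Int) status =>
          (acc.1 + 1,
           (if status == "ok" then acc.2.1 + 1 else acc.2.1),
           (if status != "ok" && status == "error" then acc.2.2 + 1 else acc.2.2)))
        ((0 : Int), (0 : Int), (0 : Int));
       if t.2.1 == t.1 then "complete"
       else if t.2.1 > 0 then "partial"
       else if t.2.2 > 0 then "error"
       else "missing") := by
  simp only [pv_fold_counts, zero_add]
  by_cases hall : vs.all (fun status => status == "ok")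
  · have : vs.count "ok" = vs.length := by
      rw [List.count_eq_length]
      intro b hb
      have := List.all_eq_true.mp hall b hb
      exact (beq_iff_eq.mp this).symm
    simp [hall, this]
  · have hne : (vs.count "ok" : Int) ≠ (vs.length : Int) := by
      intro h
      apply hall
      rw [List.all_eq_true]
      intro b hb
      have hc : vs.count "ok" = vs.length := by exact_mod_cast h
      exact beq_iff_eq.mpr ((List.count_eq_length.mp hc) b hb).symm
    have hnil : vs ≠ [] := by rintro rfl; exact hall (by simp)
    have hlen0 : 0 < vs.length := List.length_pos_iff.mpr hnil
    have hle : vs.count "ok" ≤ vs.length := List.count_le_length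
    by_cases hany : vs.any (fun status => status == "ok")
    · have : 0 < vs.count "ok" := by
        rw [List.count_pos_iff]
        obtain ⟨b, hb, hbe⟩ := List.any_eq_true.mp hany
        exact (beq_iff_eq.mp hbe) ▸ hb
      simp [hall, hne, hany]
      intro h
      exact absurd (List.count_pos_iff.mp this) h
    · have hcz : vs.count "ok" = 0 := by
        rw [List.count_eq_zero]
        intro h
        exact hany (List.any_eq_true.mpr ⟨"ok", h, beq_iff_eq.mpr rfl⟩)
      by_cases herr : vs.any (fun status => status == "error")
      · have : 0 < vs.count "error" := by
          rw [List.count_pos_iff]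
          obtain ⟨b, hb, hbe⟩ := List.any_eq_true.mp herr
          exact (beq_iff_eq.mp hbe) ▸ hb
        have hmem := List.count_pos_iff.mp this
        simp [hall, hany, herr, hcz, hmem]
        omega
      · have hez : vs.count "error" = 0 := by
          rw [List.count_eq_zero]
          intro h
          exact herr (List.any_eq_true.mpr ⟨"error", h, beq_iff_eq.mpr rfl⟩)
        simp [hall, hany, herr, hcz, hez]
        omega

-- ===== VERDICT (by name: the statement is the Claim_ definition above) =====
theorem status_label_spec : Claim_equal_status_label := by
  intro statuses _
  unfold Spec_status_label status_label status_label_alt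
  exact status_label_agree _
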